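-- pv_equiv track=rewrite | github.com/PatiLetsPlay/5BHWII_Klaric_Rubner | 02_Poker/Poker.py | zweipaar
-- ===== SOURCE A (Python) =====
-- def zweipaar(alle_gezogen):
--     wie_oft_zahl_gezogen = [0 for _ in range(0, 13)]
--
--     # alleGezogen wird durchgegangen und an der Stelle der gezogenene Zahl um 1 erhöht
--     # gezogene Zahl 3 am Index 3 um 1 erhöhen
--     for gezogen in alle_gezogen:
--         wie_oft_zahl_gezogen[gezogen[1]] += 1
--     wie_oft_zahl_gezogen.sort(reverse=True)
--
--     # Zwei Paar
--     if wie_oft_zahl_gezogen[0] == 2 and wie_oft_zahl_gezogen[1] == 2: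
--         return True
--     return False
-- ===== SOURCE B (Python) =====
-- def zweipaar(alle_gezogen):
--     wie_oft_zahl_gezogen = [0 for _ in range(0, 13)]
--     for gezogen in alle_gezogen:
--         wie_oft_zahl_gezogen[gezogen[1]] += 1
--     # one pass instead of sorting: two-pair iff >= 2 ranks occur exactly twice
--     # and no rank occurs three or more times
--     paare = 0
--     drilling = False
--     for n in wie_oft_zahl_gezogen:
--         if n == 2:
--             paare += 1
--         elif n >= 3:
--             drilling = True
--     return paare >= 2 and not drilling
-- ===== Notes on version B (the rewrite author's own statement) =====
-- stated objective: simpler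
-- what changed: Keeps the same counting loop but replaces the descending sort plus reading slots [0] and [1] by a single pass over the 13 counts that tallies ranks occurring exactly twice and flags any rank occurring three or more times.
import Mathlib
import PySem

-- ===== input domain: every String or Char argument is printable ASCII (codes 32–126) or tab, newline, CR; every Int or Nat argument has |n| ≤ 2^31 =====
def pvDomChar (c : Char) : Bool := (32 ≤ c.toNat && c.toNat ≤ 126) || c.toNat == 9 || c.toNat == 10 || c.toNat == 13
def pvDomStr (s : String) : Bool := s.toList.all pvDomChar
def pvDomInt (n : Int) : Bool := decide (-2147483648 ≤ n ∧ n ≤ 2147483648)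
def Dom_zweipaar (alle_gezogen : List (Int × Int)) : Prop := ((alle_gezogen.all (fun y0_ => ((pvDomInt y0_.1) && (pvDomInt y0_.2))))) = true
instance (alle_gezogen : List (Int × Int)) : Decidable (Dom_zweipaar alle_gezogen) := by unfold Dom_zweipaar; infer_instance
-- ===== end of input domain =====

-- B keeps A's counting loop over the 13-slot list but replaces the descending
-- sort + reading slots [0]/[1] by one pass tallying exact pairs and flagging
-- triples (objective: simpler).

-- ===== PORT A =====
-- wie_oft_zahl_gezogen[gezogen[1]] += 1  (read then write; none = IndexError)
def zweipaarStep (c : List Int) (g : Int × Int) : Option (List Int) :=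
  (PySem.List.pyGet? c g.2).bind fun v => PySem.List.pySet? c g.2 (v + 1)

def zweipaar (alle_gezogen : List (Int × Int)) : Bool :=
  let init : List Int := (PySem.List.pyRange 0 13 1).map (fun _ => 0)
  match alle_gezogen.foldlM zweipaarStep init with
  | none => false
  | some counts =>
    let s := PySem.List.sorted counts (fun x => x) true
    match PySem.List.pyGet? s 0, PySem.List.pyGet? s 1 with
    | some a, some b => a == 2 && b == 2
    | _, _ => false

-- ===== PORT B =====
-- one pass over the counts: pairs found so far, and whether a triple+ exists
def zweipaarScanStep (p : Int × Bool) (n : Int) : Int × Bool :=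
  if n == 2 then (p.1 + 1, p.2) else if 3 ≤ n then (p.1, true) else p

def zweipaar_alt (alle_gezogen : List (Int × Int)) : Bool :=
  let init : List Int := List.replicate 13 0
  match alle_gezogen.foldlM zweipaarStep init with
  | none => false
  | some counts =>
    let st := counts.foldl zweipaarScanStep (0, false)
    decide (2 ≤ st.1) && !st.2

-- ===== PRECONDITION & SPEC =====
-- Pre_ excludes exactly the inputs on which A raises IndexError: a drawn rank
-- outside the valid Python indices -13..12 of the 13-slot count list.
def Pre_zweipaar (alle_gezogen : List (Int × Int)) : Prop :=
  ∀ g ∈ alle_gezogen, PySem.Raise.InRange 13 g.2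
instance (alle_gezogen : List (Int × Int)) : Decidable (Pre_zweipaar alle_gezogen) := by
  unfold Pre_zweipaar; infer_instance

def pvWitness_zweipaar : (List (Int × Int)) := [(1, 3), (2, 3), (3, 7), (4, 7), (5, 12)]

def Spec_zweipaar (alle_gezogen : List (Int × Int)) (out : Bool) : Prop := out = zweipaar_alt alle_gezogen
instance (alle_gezogen : List (Int × Int)) (out : Bool) : Decidable (Spec_zweipaar alle_gezogen out) := by unfold Spec_zweipaar; infer_instance

-- ===== CLAIM (what is proved, stated in full; the proofs are below) =====
def Claim_equal_zweipaar : Prop := ∀ (alle_gezogen : List (Int × Int)), Dom_zweipaar alle_gezogen → Pre_zweipaar alle_gezogen → Spec_zweipaar alle_gezogen (zweipaar alle_gezogen)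

-- ===== LEMMAS AND PROOFS =====

-- the two ports build the count list from the same initial list
lemma init_eq : (PySem.List.pyRange 0 13 1).map (fun _ => (0 : Int)) = List.replicate 13 0 := by
  decide

-- one counting step preserves the length of the count list
lemma zweipaarStep_length {c c' : List Int} {g : Int × Int}
    (h : zweipaarStep c g = some c') : c'.length = c.length := by
  unfold zweipaarStep at h
  cases hg : PySem.List.pyGet? c g.2 with
  | none => simp [hg] at h
  | some v =>
    simp only [hg, PySem.List.pySet?] at h
    cases hk : PySem.List.pyIdx? c.length g.2 with
    | none => simp [hk] at h
    | some k =>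
      rw [hk] at h
      simp only [Option.map_some, Option.bind_some, Option.some.injEq] at h
      subst h; simp

-- hence the whole counting loop does
lemma fold_length : ∀ (l : List (Int × Int)) (c c' : List Int),
    l.foldlM zweipaarStep c = some c' → c'.length = c.length := by
  intro l
  induction l with
  | nil => intro c c' h; simp [List.foldlM] at h; simp [h]
  | cons g t ih =>
    intro c c' h
    simp only [List.foldlM_cons] at h
    cases hs : zweipaarStep c g with
    | none => simp [hs] at h
    | some c1 =>
      simp only [hs] at h
      have := ih c1 c' h
      rw [this, zweipaarStep_length hs]

-- B's scan over the counts computes (pair count, triple flag)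
lemma scan_spec : ∀ (c : List Int) (p : Int) (b : Bool),
    c.foldl zweipaarScanStep (p, b)
    = (p + (c.countP (fun n => n == 2) : Int), b || c.any (fun n => decide (3 ≤ n))) := by
  intro c
  induction c with
  | nil => simp
  | cons n t ih =>
    intro p b
    rw [List.foldl_cons]
    by_cases h2 : n = 2
    · rw [show zweipaarScanStep (p, b) n = (p + 1, b) from by simp [zweipaarScanStep, h2], ih]
      simp only [Prod.mk.injEq]
      constructor
      · simp [h2]; ring
      · simp [h2]
    · by_cases h3 : 3 ≤ n
      · rw [show zweipaarScanStep (p, b) n = (p, true) from by simp [zweipaarScanStep, h2, h3], ih]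
        simp [h2, h3]
      · rw [show zweipaarScanStep (p, b) n = (p, b) from by simp [zweipaarScanStep, h2, h3], ih]
        simp [h2, h3]

-- the two-pair test read off the sorted counts equals B's direct test
lemma sorted_test (counts : List Int) (hlen : counts.length = 13) :
    (match PySem.List.pyGet? (PySem.List.sorted counts (fun x => x) true) 0,
           PySem.List.pyGet? (PySem.List.sorted counts (fun x => x) true) 1 with
     | some a, some b => a == 2 && b == 2
     | _, _ => false)
    = (decide (2 ≤ (counts.countP (fun n => n == 2) : Int))
        && !(counts.any (fun n => decide (3 ≤ n)))) := by
  have hperm := PySem.List.sorted_perm counts (fun x => x) true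
  have hpw := PySem.List.sorted_pairwise_rev counts (fun x => x)
  have hslen : (PySem.List.sorted counts (fun x => x) true).length = 13 := by
    rw [PySem.List.length_sorted, hlen]
  rcases hsl : PySem.List.sorted counts (fun x => x) true with _ | ⟨a, _ | ⟨b, t⟩⟩
  · rw [hsl] at hslen
    exact absurd hslen (by decide)
  · rw [hsl] at hslen
    simp only [List.length_cons, List.length_nil] at hslen
    omega
  · rw [hsl] at hperm hpw
    have hget0 : PySem.List.pyGet? (a :: b :: t) 0 = some a := by
      have h0 : (0:Int) ≤ (t.length:Int) + 1 := by positivity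
      simp [PySem.List.pyGet?, PySem.List.pyIdx?, h0]
    have hget1 : PySem.List.pyGet? (a :: b :: t) 1 = some b := by
      have h1 : (1:Int) < (t.length:Int) + 1 + 1 := by omega
      simp [PySem.List.pyGet?, PySem.List.pyIdx?, h1]
    rw [hget0, hget1]
    dsimp only
    -- transfer countP / any across the permutation
    have hcnt : counts.countP (fun n => n == 2) = (a :: b :: t).countP (fun n => n == 2) :=
      (hperm.countP_eq _).symm
    have hany : counts.any (fun n => decide (3 ≤ n)) = (a :: b :: t).any (fun n => decide (3 ≤ n)) := by
      rcases hb : (a :: b :: t).any (fun n => decide (3 ≤ n)) with _ | _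
      · simp only [List.any_eq_false] at hb ⊢
        intro x hx; exact hb x (hperm.mem_iff.mpr hx)
      · simp only [List.any_eq_true] at hb ⊢
        obtain ⟨x, hx, hx3⟩ := hb
        exact ⟨x, hperm.mem_iff.mp hx, hx3⟩
    rw [hcnt, hany]
    -- now a pure fact about the descending list a :: b :: t
    rw [List.pairwise_cons] at hpw
    obtain ⟨ha, hpw2⟩ := hpw
    rw [List.pairwise_cons] at hpw2
    obtain ⟨hab, hpwt⟩ := hpw2
    have hba : b ≤ a := ha b (List.mem_cons_self ..)
    rcases hA : (a == 2 && b == 2) with _ | _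
    · -- A's test false: either some element ≥ 3, or fewer than two 2's
      simp only [Bool.and_eq_false_iff, beq_eq_false_iff_ne, ne_eq] at hA
      symm
      rw [Bool.and_eq_false_iff]
      by_cases h3 : 3 ≤ a
      · right
        simp only [Bool.not_eq_false', List.any_eq_true]
        exact ⟨a, List.mem_cons_self .., by simpa using h3⟩
      · -- a ≤ 2, so every element ≤ 2; the failure must be a count shortfall
        left
        have hle : ∀ x ∈ a :: b :: t, x ≤ 2 := by
          intro x hx
          rcases List.mem_cons.mp hx with rfl | hx
          · omega
          · have := ha x hx; omega
        have hcnt2 : (a :: b :: t).countP (fun n => n == 2) < 2 := by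
          have htz : b ≠ 2 → t.countP (fun n => n == 2) = 0 := by
            intro hbb
            rw [List.countP_eq_zero]
            intro x hx
            have hxb : x ≤ b := hab x hx
            simp only [beq_iff_eq]
            intro hx2
            have := hle b (by simp)
            omega
          simp only [List.countP_cons]
          by_cases hbb : b = 2
          · have ha2 : a ≠ 2 := by
              rcases hA with h | h
              · exact h
              · exact absurd hbb h
            have htz2 : t.countP (fun n => n == 2) = 0 := by
              rw [List.countP_eq_zero]
              intro x hx
              have hxb : x ≤ b := hab x hx
              simp only [beq_iff_eq]
              intro hx2
              omega
            simp [htz2, ha2, hbb]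
          · simp [htz hbb, hbb]
            split_ifs <;> omega
        simp only [decide_eq_false_iff_not, not_le]
        exact_mod_cast hcnt2
    · -- A's test true: a = b = 2, descending ⇒ all ≤ 2 and two 2's counted
      simp only [Bool.and_eq_true, beq_iff_eq] at hA
      obtain ⟨ha2, hb2⟩ := hA
      symm
      rw [Bool.and_eq_true]
      constructor
      · simp only [decide_eq_true_iff]
        have h2 : 2 ≤ (a :: b :: t).countP (fun n => n == 2) := by
          simp [ha2, hb2]
        exact_mod_cast h2
      · simp only [Bool.not_eq_true']
        rw [List.any_eq_false]
        intro x hx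
        rcases List.mem_cons.mp hx with rfl | hx
        · simp [ha2]
        · rcases List.mem_cons.mp hx with rfl | hx
          · simp [hb2]
          · have := hab x hx
            simp; omega

-- ===== VERDICT (by name: the statement is the Claim_ definition above) =====
theorem zweipaar_spec : Claim_equal_zweipaar := by
  intro alle _hdom _hpre
  simp only [Spec_zweipaar, zweipaar, zweipaar_alt, init_eq]
  cases hf : alle.foldlM zweipaarStep (List.replicate 13 0) with
  | none => rfl
  | some counts =>
    have hlen : counts.length = 13 := by
      have := fold_length alle (List.replicate 13 0) counts hf
      simpa using this
    dsimp only
    rw [scan_spec counts 0 false]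
    rw [sorted_test counts hlen]
    simp
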